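-- pv_equiv track=rewrite | github.com/wagner-group/MarkMyWords | src/watermark_benchmark/metrics/ppl.py | get_items_after_nth_turn
-- ===== SOURCE A (Python) =====
-- def get_items_after_nth_turn(array, value, n):
--     occurrence_count = 0
--     for index, pair in enumerate(array):
--         number, _ = pair
--         if number == value:
--             occurrence_count += 1
--             if occurrence_count == n:
--                 return array[index:]
--
--     # If the nth occurrence is never found, return an empty list
--     return []
-- ===== SOURCE B (Python) =====
-- def get_items_after_nth_turn(array, value, n):
--     idx = [i for i, (number, _) in enumerate(array) if number == value]
--     if 1 <= n <= len(idx):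
--         return array[idx[n - 1]:]
--     return []
-- ===== Notes on version B (the rewrite author's own statement) =====
-- stated objective: simpler
-- what changed: Replaces the early-returning counting loop with a one-shot comprehension building the table of matching indices followed by a direct positional lookup and slice.
import Mathlib
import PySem

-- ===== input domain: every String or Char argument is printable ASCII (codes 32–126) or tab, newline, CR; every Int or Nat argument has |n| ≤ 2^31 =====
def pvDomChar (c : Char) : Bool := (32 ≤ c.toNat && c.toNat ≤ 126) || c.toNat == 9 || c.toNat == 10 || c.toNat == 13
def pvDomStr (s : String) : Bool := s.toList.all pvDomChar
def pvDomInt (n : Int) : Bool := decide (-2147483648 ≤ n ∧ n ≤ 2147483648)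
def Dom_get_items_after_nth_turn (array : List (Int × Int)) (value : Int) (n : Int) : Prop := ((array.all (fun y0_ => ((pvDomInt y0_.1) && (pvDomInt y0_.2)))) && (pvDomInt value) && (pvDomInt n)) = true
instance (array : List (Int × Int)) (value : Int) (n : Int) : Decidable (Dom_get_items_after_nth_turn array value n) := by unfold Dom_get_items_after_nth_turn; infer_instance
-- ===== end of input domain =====

-- B builds the index table of matches in one comprehension and slices at a direct
-- positional lookup, instead of A's early-returning counting loop (objective: simpler).

-- ===== PORT A =====
-- A's for-loop over enumerate(array) with the running occurrence counter, early return.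
def pvLoopA (array : List (Int × Int)) (value : Int) (n : Int) :
    List (Int × (Int × Int)) → Int → List (Int × Int)
  | [], _ => []
  | (index, pair) :: rest, occ =>
    if pair.1 == value then
      if occ + 1 == n then PySem.List.slice array (some index) none
      else pvLoopA array value n rest (occ + 1)
    else pvLoopA array value n rest occ

def get_items_after_nth_turn (array : List (Int × Int)) (value : Int) (n : Int) : List (Int × Int) :=
  pvLoopA array value n (PySem.List.enumerate array) 0

-- ===== PORT B =====
def get_items_after_nth_turn_alt (array : List (Int × Int)) (value : Int) (n : Int) : List (Int × Int) :=
  let idx := ((PySem.List.enumerate array).filter (fun ip => ip.2.1 == value)).map (·.1)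
  if 1 ≤ n ∧ n ≤ (idx.length : Int) then
    PySem.List.slice array (some (idx.getD (n - 1).toNat 0)) none
  else []

-- ===== PRECONDITION & SPEC =====
def Spec_get_items_after_nth_turn (array : List (Int × Int)) (value : Int) (n : Int) (out : List (Int × Int)) : Prop := out = get_items_after_nth_turn_alt array value n
instance (array : List (Int × Int)) (value : Int) (n : Int) (out : List (Int × Int)) : Decidable (Spec_get_items_after_nth_turn array value n out) := by unfold Spec_get_items_after_nth_turn; infer_instance

-- ===== CLAIM (what is proved, stated in full; the proofs are below) =====
def Claim_equal_get_items_after_nth_turn : Prop := ∀ (array : List (Int × Int)) (value : Int) (n : Int), Dom_get_items_after_nth_turn array value n → Spec_get_items_after_nth_turn array value n (get_items_after_nth_turn array value n)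

-- ===== LEMMAS AND PROOFS =====

-- The counting loop, started at counter occ, is the (n-occ)-th entry of the match table.
theorem pvLoopA_eq (array : List (Int × Int)) (value : Int) (n : Int)
    (es : List (Int × (Int × Int))) (occ : Int) :
    pvLoopA array value n es occ =
      (let idx := (es.filter (fun ip => ip.2.1 == value)).map (·.1)
       if occ < n ∧ n ≤ occ + (idx.length : Int) then
         PySem.List.slice array (some (idx.getD (n - occ - 1).toNat 0)) none
       else []) := by
  induction es generalizing occ with
  | nil =>
    simp only [pvLoopA, List.filter_nil, List.map_nil, List.length_nil]
    split_ifs with h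
    · omega
    · rfl
  | cons e rest ih =>
    obtain ⟨i, p⟩ := e
    simp only [pvLoopA]
    by_cases hm : p.1 == value
    · simp only [hm, if_true, List.filter_cons, List.map_cons, List.length_cons]
      by_cases he : occ + 1 = n
      · have : (occ + 1 == n) = true := by simp [he]
        simp only [this, if_true]
        rw [if_pos (by push_cast; omega)]
        have : (n - occ - 1).toNat = 0 := by omega
        simp [this]
      · have : (occ + 1 == n) = false := by simp [he]
        simp only [this, Bool.false_eq_true, if_false, ih]
        by_cases hc : occ + 1 < n ∧ n ≤ occ + 1 + (((rest.filter (fun ip => ip.2.1 == value)).map (·.1)).length : Int)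
        · rw [if_pos hc, if_pos (by push_cast at hc ⊢; omega)]
          have h1 : (n - occ - 1).toNat = (n - (occ + 1) - 1).toNat + 1 := by omega
          simp [h1]
        · rw [if_neg hc, if_neg (by push_cast at hc ⊢; omega)]
    · simp only [hm, Bool.false_eq_true, if_false, List.filter_cons, ih]

-- ===== VERDICT (by name: the statement is the Claim_ definition above) =====
theorem get_items_after_nth_turn_spec : Claim_equal_get_items_after_nth_turn := by
  intro array value n _
  show _ = _
  rw [get_items_after_nth_turn, pvLoopA_eq, get_items_after_nth_turn_alt]
  simp only []
  rw [show n - 0 - 1 = n - 1 from by omega]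
  split_ifs with h1 h2 h2 <;> first | rfl | omega
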